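-- pv_equiv track=rewrite | github.com/aristocratte/checkdmarc_analyzer | final_scripts/checkdmarc_enhanced.py | get_component_status
-- ===== SOURCE A (Python) =====
-- from typing import List, Dict, Tuple, Optional
--
-- Status = Tuple[str, str, str]  # (LEVEL, MESSAGE, REFKEY)
--
-- def get_component_status(statuses: List[Status], component: str) -> str:
--     """Determines component status based on analysis messages."""
--     critical_found = False
--     warning_found = False
--
--     for status in statuses:
--         message = status[1].upper()
--         if component.upper() in message:
--             if status[0] == 'CRITICAL':
--                 critical_found = True
--             elif status[0] == 'WARNING':
--                 warning_found = True
--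
--     if critical_found:
--         return 'CRITICAL'
--     elif warning_found:
--         return 'WARNING'
--     else:
--         return 'OK'
-- ===== SOURCE B (Python) =====
-- def get_component_status(statuses, component):
--     """Determines component status based on analysis messages."""
--     comp = component.upper()
--     if any(s[0] == 'CRITICAL' and comp in s[1].upper() for s in statuses):
--         return 'CRITICAL'
--     if any(s[0] == 'WARNING' and comp in s[1].upper() for s in statuses):
--         return 'WARNING'
--     return 'OK'
-- ===== Notes on version B (the rewrite author's own statement) =====
-- stated objective: idiomatic
-- what changed: Replaces the single loop that maintains two boolean flags and a final if-chain with two short-circuiting any() scans (CRITICAL first, then WARNING), which stop at the first hit instead of always scanning and uppercasing every message.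
import Mathlib
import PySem

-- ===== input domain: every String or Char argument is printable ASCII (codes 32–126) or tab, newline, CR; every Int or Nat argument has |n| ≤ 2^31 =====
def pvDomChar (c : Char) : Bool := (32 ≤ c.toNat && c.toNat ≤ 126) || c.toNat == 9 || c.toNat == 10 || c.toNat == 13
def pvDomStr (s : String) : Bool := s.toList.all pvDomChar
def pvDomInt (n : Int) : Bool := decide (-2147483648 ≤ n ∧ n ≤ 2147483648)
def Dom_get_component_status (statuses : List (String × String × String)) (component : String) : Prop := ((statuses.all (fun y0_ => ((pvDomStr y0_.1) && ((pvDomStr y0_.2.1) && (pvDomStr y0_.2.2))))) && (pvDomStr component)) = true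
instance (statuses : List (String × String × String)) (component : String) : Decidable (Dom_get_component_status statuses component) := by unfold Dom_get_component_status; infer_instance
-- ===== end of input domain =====

-- B replaces A's single flag-accumulating loop with two short-circuiting any-scans (idiomatic decomposition; same O(n) cost).

-- ===== PORT A =====
-- one loop maintaining (critical_found, warning_found), then an if-chain
def get_component_status (statuses : List (String × String × String)) (component : String) : String :=
  let st := statuses.foldl (fun (acc : Bool × Bool) status =>
    let message := PySem.Str.upper status.2.1
    if PySem.Str.isIn (PySem.Str.upper component) message then
      if status.1 == "CRITICAL" then (true, acc.2)
      else if status.1 == "WARNING" then (acc.1, true)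
      else acc
    else acc) (false, false)
  if st.1 then "CRITICAL" else if st.2 then "WARNING" else "OK"

-- ===== PORT B =====
-- Source B: comp = component.upper(); two any() scans, CRITICAL first
def get_component_status_alt (statuses : List (String × String × String)) (component : String) : String :=
  let comp := PySem.Str.upper component
  if statuses.any (fun s => s.1 == "CRITICAL" && PySem.Str.isIn comp (PySem.Str.upper s.2.1)) then "CRITICAL"
  else if statuses.any (fun s => s.1 == "WARNING" && PySem.Str.isIn comp (PySem.Str.upper s.2.1)) then "WARNING"
  else "OK"

-- ===== PRECONDITION & SPEC =====
def Spec_get_component_status (statuses : List (String × String × String)) (component : String) (out : String) : Prop := out = get_component_status_alt statuses component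
instance (statuses : List (String × String × String)) (component : String) (out : String) : Decidable (Spec_get_component_status statuses component out) := by unfold Spec_get_component_status; infer_instance

-- ===== CLAIM (what is proved, stated in full; the proofs are below) =====
def Claim_equal_get_component_status : Prop := ∀ (statuses : List (String × String × String)) (component : String), Dom_get_component_status statuses component → Spec_get_component_status statuses component (get_component_status statuses component)

-- ===== LEMMAS AND PROOFS =====

-- A's fold computes exactly (a || any CRITICAL-hit, b || any WARNING-hit); stated in Chars normal form
theorem foldl_flags (statuses : List (String × String × String)) (compL : List Char) (a b : Bool) :
    statuses.foldl (fun (acc : Bool × Bool) status =>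
      if PySem.Chars.isIn compL (PySem.Chars.upper status.2.1.toList) then
        if status.1 = "CRITICAL" then (true, acc.2)
        else if status.1 = "WARNING" then (acc.1, true)
        else acc
      else acc) (a, b)
    = (a || statuses.any (fun s => s.1 == "CRITICAL" && PySem.Chars.isIn compL (PySem.Chars.upper s.2.1.toList)),
       b || statuses.any (fun s => s.1 == "WARNING" && PySem.Chars.isIn compL (PySem.Chars.upper s.2.1.toList))) := by
  induction statuses generalizing a b with
  | nil => simp
  | cons s rest ih =>
    simp only [List.foldl_cons, List.any_cons]
    split_ifs with hin hc hw
    · rw [ih]; simp [hc, hin]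
    · rw [ih]; simp [hw, hin]
    · rw [ih]; simp [hin, beq_eq_false_iff_ne.mpr hc, beq_eq_false_iff_ne.mpr hw]
    · rw [ih]; simp [hin]

-- ===== VERDICT (by name: the statement is the Claim_ definition above) =====
theorem get_component_status_spec : Claim_equal_get_component_status := by
  intro statuses component _
  unfold Spec_get_component_status get_component_status get_component_status_alt
  simp only [PySem.Str.isIn_eq, PySem.Str.toList_upper, beq_iff_eq]
  rw [foldl_flags]
  simp only [Bool.false_or]
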